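-- pv_equiv track=rewrite | github.com/INF-1007/tp2-l03-08 | exercice5.py | categoriser_rapports
-- ===== SOURCE A (Python) =====
-- def analyser_rapport(texte, mots_cles):
--     """
--     Calcule le score d’un rapport et extrait les mots-clés détectés.
--
--     Étapes attendues :
--     1) Mettre le texte en minuscules
--     2) Compter les occurrences de chaque mot-clé
--        (approche simple autorisée : split() + comparaison de mots)
--     3) score = 5 + somme(occurrences * score_mot)
--     4) borner score entre 0 et 10
--     5) retourner (score, liste_mots_trouves_sans_doublons)
--
--     Args:
--         texte (str)
--         mots_cles (dict): {mot: score_int}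
--
--     Returns:
--         tuple: (score_int, mots_trouves_list)
--     """
--     score = 5
--     mots_trouves = []
--
--     # TODO 1 : normaliser texte (minuscules)
--     texte = texte.lower()
--     # TODO 2 : découper en mots. Attention aussi à enlever la ponctuation basique aux extrémités (utiliser la fonction strip())S.
--     mots = texte.split()
--     motsClean = []
--     for mot in mots:
--         mot = mot.strip(".,:;!?()[]{}\"'")
--         motsClean.append(mot)
--     # TODO 3 : pour chaque mot-clé :
--     #    - mettre à jour le score
--     #    - si occurrences > 0 : ajouter le mot à mots_trouves (sans doublons)
--     for mot in motsClean :
--         if mot in mots_cles :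
--             score += mots_cles[mot]
--             if mot not in mots_trouves :
--                 mots_trouves.append(mot)
--
--     # TODO 4 : borner score entre 0 et 10 (min/max)
--     if score < 0:
--         score = 0
--     if score > 10:
--         score = 10
--
--     # TODO 5 : retourner (score, mots_trouves)
--
--     return (score, mots_trouves)
--
-- def categoriser_rapports(rapports, mots_cles):
--     """
--     Classe les rapports en 3 catégories selon leur score :
--
--     - 'positifs' : score >= 7
--     - 'neutres'  : 4 <= score <= 6
--     - 'negatifs' : score <= 3
--
--     Args:
--         rapports (list): liste de chaînes
--         mots_cles (dict)
--
--     Returns: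
--         dict: {
--             'positifs': [(texte, score), ...],
--             'neutres':  [(texte, score), ...],
--             'negatifs': [(texte, score), ...]
--         }
--     """
--     categories = {'positifs': [], 'neutres': [], 'negatifs': []}
--
--     # TODO :
--     # Pour chaque texte :
--     #   - faire une analyse du rapport pour en tirer le score
--     #   - mettre à jour "categories"
--     for rapport in rapports :
--         score, _ = analyser_rapport(rapport, mots_cles)
--         if score <= 3 :
--             categories['negatifs'].append((rapport, score))
--         elif 4 <= score <= 6 :
--             categories['neutres'].append((rapport, score))
--         elif 7 <= score :
--             categories['positifs'].append((rapport, score))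
--
--     return categories
-- ===== SOURCE B (Python) =====
-- def categoriser_rapports(rapports, mots_cles):
--     def score_rapport(rapport):
--         counts = {}
--         for w in rapport.lower().split():
--             w = w.strip(".,:;!?()[]{}\"'")
--             counts[w] = counts.get(w, 0) + 1
--         s = 5 + sum(c * mots_cles[w] for w, c in counts.items() if w in mots_cles)
--         return max(0, min(10, s))
--     scored = [(r, score_rapport(r)) for r in rapports]
--     return {'positifs': [p for p in scored if p[1] >= 7],
--             'neutres':  [p for p in scored if 4 <= p[1] <= 6],
--             'negatifs': [p for p in scored if p[1] <= 3]}
-- ===== Notes on version B (the rewrite author's own statement) =====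
-- stated objective: alternative
-- what changed: B scores each report from a frequency table of its distinct cleaned words (sum of count*weight over the keywords found in the table, no found-words list), and builds the three categories by filtering one scored list instead of appending inside an if/elif chain.
import Mathlib
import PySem

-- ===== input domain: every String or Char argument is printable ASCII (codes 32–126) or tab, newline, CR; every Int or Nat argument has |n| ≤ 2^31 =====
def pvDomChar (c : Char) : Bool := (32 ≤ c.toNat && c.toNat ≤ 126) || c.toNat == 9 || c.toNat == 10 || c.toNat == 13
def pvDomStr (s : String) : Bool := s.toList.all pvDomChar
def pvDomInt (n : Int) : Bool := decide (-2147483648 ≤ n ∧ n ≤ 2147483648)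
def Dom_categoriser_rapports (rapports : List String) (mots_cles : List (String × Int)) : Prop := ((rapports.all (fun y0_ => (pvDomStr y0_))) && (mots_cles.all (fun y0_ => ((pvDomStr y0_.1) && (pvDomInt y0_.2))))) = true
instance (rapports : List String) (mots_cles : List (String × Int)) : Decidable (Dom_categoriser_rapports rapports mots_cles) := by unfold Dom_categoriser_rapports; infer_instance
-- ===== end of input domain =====

-- B restructures the scoring: a per-report frequency table summed over the keyword dict (instead of a
-- word scan with membership tests and a found-words list) and three filters of one scored list
-- (instead of an if/elif append chain). Same results; an alternative, not claimed faster.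

-- ===== PORT A =====
def pvStripSet : String := ".,:;!?()[]{}\"'"

-- port of analyser_rapport (the dict argument is the PySem.Dict the caller builds from the assoc list)
def analyser_rapport (texte : String) (mots_cles : PySem.Dict String Int) : Int × List String :=
  let texte := PySem.Str.lower texte
  let mots := PySem.Str.split₀ texte
  let motsClean := mots.foldl (fun acc mot => acc ++ [PySem.Str.stripChars mot pvStripSet]) []
  let st := motsClean.foldl (fun (p : Int × List String) mot =>
      if mots_cles.contains mot then
        (p.1 + mots_cles.getD mot 0, if mot ∈ p.2 then p.2 else p.2 ++ [mot])
      else p) (5, [])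
  let score := st.1
  let score := if score < 0 then (0 : Int) else score
  let score := if score > 10 then (10 : Int) else score
  (score, st.2)

-- the three-key categories dict is ported as a triple of its three lists, returned in key order
def categoriser_rapports (rapports : List String) (mots_cles : List (String × Int)) : List (String × List (String × Int)) :=
  let d := PySem.Dict.ofList mots_cles
  let cats := rapports.foldl
    (fun (c : List (String × Int) × List (String × Int) × List (String × Int)) rapport =>
      let score := (analyser_rapport rapport d).1
      if score ≤ 3 then (c.1, c.2.1, c.2.2 ++ [(rapport, score)])
      else if 4 ≤ score ∧ score ≤ 6 then (c.1, c.2.1 ++ [(rapport, score)], c.2.2)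
      else if 7 ≤ score then (c.1 ++ [(rapport, score)], c.2.1, c.2.2)
      else c) ([], [], [])
  [("positifs", cats.1), ("neutres", cats.2.1), ("negatifs", cats.2.2)]

-- ===== PORT B =====
def pvScoreRapport (rapport : String) (mots_cles : PySem.Dict String Int) : Int :=
  let words := (PySem.Str.split₀ (PySem.Str.lower rapport)).map (fun w => PySem.Str.stripChars w pvStripSet)
  let counts := words.foldl (fun d w => d.insert w (d.getD w 0 + 1)) PySem.Dict.empty
  let s := 5 + ((counts.items.filter (fun p => mots_cles.contains p.1)).map
      (fun p => p.2 * mots_cles.getD p.1 0)).sum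
  max 0 (min 10 s)

def categoriser_rapports_alt (rapports : List String) (mots_cles : List (String × Int)) : List (String × List (String × Int)) :=
  let d := PySem.Dict.ofList mots_cles
  let scored := rapports.map (fun r => (r, pvScoreRapport r d))
  [("positifs", scored.filter (fun p => 7 ≤ p.2)),
   ("neutres",  scored.filter (fun p => 4 ≤ p.2 ∧ p.2 ≤ 6)),
   ("negatifs", scored.filter (fun p => p.2 ≤ 3))]

-- ===== PRECONDITION & SPEC =====
def Spec_categoriser_rapports (rapports : List String) (mots_cles : List (String × Int)) (out : List (String × List (String × Int))) : Prop := out = categoriser_rapports_alt rapports mots_cles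
instance (rapports : List String) (mots_cles : List (String × Int)) (out : List (String × List (String × Int))) : Decidable (Spec_categoriser_rapports rapports mots_cles out) := by unfold Spec_categoriser_rapports; infer_instance

-- ===== CLAIM (what is proved, stated in full; the proofs are below) =====
def Claim_equal_categoriser_rapports : Prop := ∀ (rapports : List String) (mots_cles : List (String × Int)), Dom_categoriser_rapports rapports mots_cles → Spec_categoriser_rapports rapports mots_cles (categoriser_rapports rapports mots_cles)

-- ===== LEMMAS AND PROOFS =====

-- the first component of A's pair fold is the score-only fold
lemma pair_fold_fst (d : PySem.Dict String Int) :
    ∀ (ws : List String) (s : Int) (t : List String),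
    (ws.foldl (fun (p : Int × List String) mot =>
      if d.contains mot then
        (p.1 + d.getD mot 0, if mot ∈ p.2 then p.2 else p.2 ++ [mot])
      else p) (s, t)).1
    = ws.foldl (fun s mot => if d.contains mot then s + d.getD mot 0 else s) s := by
  intro ws
  induction ws with
  | nil => intro s t; rfl
  | cons m ws ih =>
      intro s t
      by_cases h : d.contains m <;> simp [h, ih]

-- summing (if k = m then g k else 0) over a duplicate-free list
lemma sum_ite_mem (g : String → Int) (m : String) :
    ∀ (l : List String), l.Nodup →
    (l.map (fun k => if k = m then g k else 0)).sum = if m ∈ l then g m else 0 := by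
  intro l
  induction l with
  | nil => simp
  | cons k l ih =>
      intro hnd
      rw [List.nodup_cons] at hnd
      by_cases h : k = m
      · subst h
        simp [ih hnd.2, hnd.1]
      · have hmk : ¬ m = k := fun e => h e.symm
        simp [h, ih hnd.2, List.mem_cons, hmk]

-- key inversion: summing count*weight over the distinct words = summing lookups over the words
lemma filtered_count_sum (d : PySem.Dict String Int) (l : List String) (hnd : l.Nodup) :
    ∀ (ws : List String), (∀ x ∈ ws, x ∈ l) →
    ((l.filter (fun k => d.contains k)).map (fun k => (ws.count k : Int) * d.getD k 0)).sum
      = (ws.map (fun m => d.getD m 0)).sum := by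
  intro ws
  induction ws with
  | nil => intro _; simp
  | cons m ws ih =>
      intro hmem
      have hm : m ∈ l := hmem m List.mem_cons_self
      have hsub : ∀ x ∈ ws, x ∈ l := fun x hx => hmem x (List.mem_cons_of_mem m hx)
      have hterm : (fun k => (((m :: ws).count k : Int)) * d.getD k 0)
          = fun k => (ws.count k : Int) * d.getD k 0 + (if k = m then d.getD k 0 else 0) := by
        funext k
        rw [List.count_cons]
        by_cases h : k = m
        · push_cast
          simp [h]
          ring
        · push_cast
          have hb : (m == k) = false := by simpa using fun e => h e.symm
          simp [hb]
          exact fun e => absurd e h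
      rw [hterm, PySem.List.sum_map_add_int,
          sum_ite_mem (fun k => d.getD k 0) m _ (hnd.filter _), ih hsub]
      by_cases hc : d.contains m = true
      · have : m ∈ l.filter (fun k => d.contains k) := List.mem_filter.mpr ⟨hm, hc⟩
        simp [this]
        ring
      · have h0 : d.contains m = false := by simpa using hc
        have hnm : m ∉ l.filter (fun k => d.contains k) := fun hmem' => hc (List.mem_filter.mp hmem').2
        have := PySem.Dict.getD_of_not_contains (d := d) (k := m) (d0 := 0) h0
        simp [hnm, this]

-- the raw (unclamped) scores agree
lemma raw_score_eq (words : List String) (d : PySem.Dict String Int) :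
    words.foldl (fun s mot => if d.contains mot then s + d.getD mot 0 else s) 5
      = 5 + (words.map (fun m => d.getD m 0)).sum := by
  have hstep : (fun (s : Int) mot => if d.contains mot then s + d.getD mot 0 else s)
      = fun s mot => s + d.getD mot 0 := by
    funext s mot
    by_cases h : d.contains mot = true
    · simp [h]
    · have h0 : d.contains mot = false := by simpa using h
      have := PySem.Dict.getD_of_not_contains (d := d) (k := mot) (d0 := 0) h0
      simp [h, this]
  rw [hstep, PySem.List.foldl_add]

-- per-report scores agree
lemma score_eq (r : String) (d : PySem.Dict String Int) :
    (analyser_rapport r d).1 = pvScoreRapport r d := by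
  unfold analyser_rapport pvScoreRapport
  simp only [PySem.List.foldl_append_singleton_eq_map, List.nil_append,
             PySem.Dict.foldl_insert_getD_add_one_eq_counter, PySem.Dict.items_counter]
  rw [pair_fold_fst, raw_score_eq]
  set ws := (PySem.Str.split₀ (PySem.Str.lower r)).map (fun w => PySem.Str.stripChars w pvStripSet) with hws
  have hfm : ((ws |> PySem.Set.ofList).map (fun k => (k, (ws.count k : Int)))).filter
        (fun p => d.contains p.1)
      = ((PySem.Set.ofList ws).filter (fun k => d.contains k)).map
        (fun k => (k, (ws.count k : Int))) := by
    rw [List.filter_map]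
    rfl
  have hB : ((((PySem.Set.ofList ws).filter (fun k => d.contains k)).map
        (fun k => (k, (ws.count k : Int)))).map (fun p => p.2 * d.getD p.1 0)).sum
      = (ws.map (fun m => d.getD m 0)).sum := by
    rw [List.map_map]
    rw [show ((fun p : String × Int => p.2 * d.getD p.1 0) ∘ fun k => (k, (ws.count k : Int)))
        = fun k => (ws.count k : Int) * d.getD k 0 from rfl]
    exact filtered_count_sum d (PySem.Set.ofList ws) (PySem.Set.nodup_ofList ws) ws
        (by intro x hx; simpa [PySem.Set.mem_ofList] using hx)
  rw [hfm, hB]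
  set t := (ws.map (fun m => d.getD m 0)).sum
  omega

-- A's categorisation fold is B's three filters
lemma cat_fold (f : String → Int) :
    ∀ (rs : List String) (a b c : List (String × Int)),
    rs.foldl (fun (cc : List (String × Int) × List (String × Int) × List (String × Int)) rapport =>
        if f rapport ≤ 3 then (cc.1, cc.2.1, cc.2.2 ++ [(rapport, f rapport)])
        else if 4 ≤ f rapport ∧ f rapport ≤ 6 then (cc.1, cc.2.1 ++ [(rapport, f rapport)], cc.2.2)
        else if 7 ≤ f rapport then (cc.1 ++ [(rapport, f rapport)], cc.2.1, cc.2.2)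
        else cc) (a, b, c)
      = (a ++ (rs.map (fun r => (r, f r))).filter (fun p => 7 ≤ p.2),
         b ++ (rs.map (fun r => (r, f r))).filter (fun p => 4 ≤ p.2 ∧ p.2 ≤ 6),
         c ++ (rs.map (fun r => (r, f r))).filter (fun p => p.2 ≤ 3)) := by
  intro rs
  induction rs with
  | nil => intro a b c; simp
  | cons r rs ih =>
      intro a b c
      simp only [List.foldl_cons, List.map_cons, List.filter_cons]
      by_cases h1 : f r ≤ 3
      · simp only [if_pos h1, ih, decide_eq_true_eq]
        simp
        omega
      · by_cases h2 : 4 ≤ f r ∧ f r ≤ 6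
        · simp only [if_neg h1, if_pos h2, ih, decide_eq_true_eq]
          simp
          omega
        · have h3 : 7 ≤ f r := by omega
          simp only [if_neg h1, if_neg h2, if_pos h3, ih, decide_eq_true_eq]
          simp

-- ===== VERDICT (by name: the statement is the Claim_ definition above) =====
theorem categoriser_rapports_spec : Claim_equal_categoriser_rapports := by
  intro rapports mots_cles _
  unfold Spec_categoriser_rapports
  have hs : ∀ r, (analyser_rapport r (PySem.Dict.ofList mots_cles)).1
      = pvScoreRapport r (PySem.Dict.ofList mots_cles) :=
    fun r => score_eq r _
  simp only [categoriser_rapports, categoriser_rapports_alt]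
  rw [cat_fold (fun r => (analyser_rapport r (PySem.Dict.ofList mots_cles)).1) rapports [] [] []]
  simp [hs]
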